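-- pv_equiv track=rewrite | github.com/johannessell/PhBlind | contour_detection03.py | group_columns
-- ===== SOURCE A (Python) =====
-- def group_columns(rects, tol=3):  # Noch niedrigere Toleranz
--     rects_sorted = sorted(rects, key=lambda r: r[0])  # sortiere nach x
--     columns = []
--     for r in rects_sorted:
--         placed = False
--         for col in columns:
--             if abs(col[0][0] - r[0]) < tol:
--                 col.append(r)
--                 placed = True
--                 break
--         if not placed:
--             columns.append([r])
--     return columns
-- ===== SOURCE B (Python) =====
-- def group_columns(rects, tol=3):
--     # One pass over the x-sorted rects: anchors of successive columns are >= tol apart,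
--     # so only the current (last) column can ever match -- no inner scan needed.
--     columns = []
--     for r in sorted(rects, key=lambda r: r[0]):
--         if columns and abs(columns[-1][0][0] - r[0]) < tol:
--             columns[-1].append(r)
--         else:
--             columns.append([r])
--     return columns
-- ===== Notes on version B (the rewrite author's own statement) =====
-- stated objective: simpler
-- what changed: B drops A's inner scan over all existing columns and compares each rect only with the last column's anchor, valid because processing in x-sorted order makes anchors increase by at least tol so only the last column can ever match.
import Mathlib
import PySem

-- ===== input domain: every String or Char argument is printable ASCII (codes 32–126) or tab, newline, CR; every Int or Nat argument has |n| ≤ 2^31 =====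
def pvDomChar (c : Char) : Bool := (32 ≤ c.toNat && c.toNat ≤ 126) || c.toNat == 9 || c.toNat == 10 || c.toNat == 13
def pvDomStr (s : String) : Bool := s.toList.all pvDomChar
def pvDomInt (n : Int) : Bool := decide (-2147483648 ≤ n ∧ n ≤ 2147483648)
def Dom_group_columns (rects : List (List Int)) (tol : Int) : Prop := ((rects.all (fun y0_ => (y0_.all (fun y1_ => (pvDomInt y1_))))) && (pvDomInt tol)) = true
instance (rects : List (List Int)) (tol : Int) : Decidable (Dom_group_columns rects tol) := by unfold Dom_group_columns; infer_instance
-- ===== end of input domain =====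

-- B replaces A's inner scan over the columns by one comparison with the last column
-- (anchors of successive columns differ by ≥ tol in x-sorted order, so only the last can match).


-- col[0][0] in both Pythons: exact under Pre_ (every rect, hence every column, is nonempty)
def pvAnchor (col : List (List Int)) : Int := (col.head?.getD []).head?.getD 0

-- ===== PORT A =====
-- the inner 'for col in columns: … break' loop: returns the updated columns if placed
def pvPlaceA (tol : Int) (r : List Int) : List (List (List Int)) → Option (List (List (List Int)))
  | [] => none
  | col :: rest =>
    if |pvAnchor col - r.head?.getD 0| < tol then some ((col ++ [r]) :: rest)
    else (pvPlaceA tol r rest).map (col :: ·)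

def group_columns (rects : List (List Int)) (tol : Int) : List (List (List Int)) :=
  (PySem.List.sorted rects (fun r => r.head?.getD 0) false).foldl
    (fun columns r =>
      match pvPlaceA tol r columns with
      | some cs => cs                -- placed = True
      | none    => columns ++ [[r]]) -- not placed
    []

-- ===== PORT B =====
def pvStepB (tol : Int) (columns : List (List (List Int))) (r : List Int) :
    List (List (List Int)) :=
  match columns.getLast? with
  | some col =>
    if |pvAnchor col - r.head?.getD 0| < tol then columns.dropLast ++ [col ++ [r]]
    else columns ++ [[r]]
  | none => [[r]]

def group_columns_alt (rects : List (List Int)) (tol : Int) : List (List (List Int)) :=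
  (PySem.List.sorted rects (fun r => r.head?.getD 0) false).foldl (pvStepB tol) []

-- ===== PRECONDITION & SPEC =====
-- Pre_ excludes rects containing an empty list, on which both Pythons' sort key r[0] raises IndexError.
def Pre_group_columns (rects : List (List Int)) (tol : Int) : Prop := ∀ r ∈ rects, r ≠ []
instance (rects : List (List Int)) (tol : Int) : Decidable (Pre_group_columns rects tol) := by unfold Pre_group_columns; infer_instance
def pvWitness_group_columns : List (List Int) × Int := ([[1, 2], [10, 2], [3, 4]], 3)
def Spec_group_columns (rects : List (List Int)) (tol : Int) (out : List (List (List Int))) : Prop := out = group_columns_alt rects tol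
instance (rects : List (List Int)) (tol : Int) (out : List (List (List Int))) : Decidable (Spec_group_columns rects tol out) := by unfold Spec_group_columns; infer_instance

-- ===== CLAIM (what is proved, stated in full; the proofs are below) =====
def Claim_equal_group_columns : Prop := ∀ (rects : List (List Int)) (tol : Int), Dom_group_columns rects tol → Pre_group_columns rects tol → Spec_group_columns rects tol (group_columns rects tol)

-- ===== LEMMAS AND PROOFS =====

-- appending r to a nonempty column keeps its anchor
theorem pvAnchor_append (col : List (List Int)) (h : col ≠ []) (r : List Int) :
    pvAnchor (col ++ [r]) = pvAnchor col := by
  cases col with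
  | nil => exact absurd rfl h
  | cons x xs => simp [pvAnchor]

-- stepB on a list of ≥ 2 columns leaves the head alone
theorem pvStepB_cons (tol : Int) (col c : List (List Int)) (cs : List (List (List Int)))
    (r : List Int) :
    pvStepB tol (col :: c :: cs) r = col :: pvStepB tol (c :: cs) r := by
  obtain ⟨last, hl⟩ : ∃ l, (c :: cs).getLast? = some l := by
    cases hcs : (c :: cs).getLast? with
    | none => simp at hcs
    | some l => exact ⟨l, rfl⟩
  simp only [pvStepB, List.getLast?_cons_cons, hl]
  split <;> simp

-- under the invariant, one step of A equals one step of B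
theorem pvStep_eq (tol : Int) (r : List Int) :
    ∀ (cs : List (List (List Int))),
      List.IsChain (fun a b => a + tol ≤ b) (cs.map pvAnchor) →
      (∀ c ∈ cs, pvAnchor c ≤ r.head?.getD 0) →
      (match pvPlaceA tol r cs with
       | some cs' => cs'
       | none => cs ++ [[r]]) = pvStepB tol cs r
  | [], _, _ => by simp [pvPlaceA, pvStepB]
  | [col], _, _ => by
    by_cases hm : |pvAnchor col - r.head?.getD 0| < tol <;>
      simp [pvPlaceA, pvStepB, hm]
  | col :: c2 :: rest, hch, hle => by
    simp only [List.map_cons] at hch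
    have h1 : pvAnchor col + tol ≤ pvAnchor c2 := hch.rel_head
    have h2 : pvAnchor c2 ≤ r.head?.getD 0 := hle c2 (by simp)
    have h3 : pvAnchor col ≤ r.head?.getD 0 := hle col (by simp)
    have hnot : ¬ |pvAnchor col - r.head?.getD 0| < tol := by
      rw [abs_sub_lt_iff]; omega
    have ih := pvStep_eq tol r (c2 :: rest) (by simpa using hch.tail)
      (fun c hc => hle c (List.mem_cons_of_mem _ hc))
    have hA : (match pvPlaceA tol r (col :: c2 :: rest) with
               | some cs' => cs'
               | none => (col :: c2 :: rest) ++ [[r]])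
            = col :: (match pvPlaceA tol r (c2 :: rest) with
                      | some cs' => cs'
                      | none => (c2 :: rest) ++ [[r]]) := by
      conv_lhs => rw [pvPlaceA]
      rw [if_neg hnot]
      cases pvPlaceA tol r (c2 :: rest) <;> simp
    rw [hA, ih, pvStepB_cons]

-- the three parts of the loop invariant are preserved by one B-step
theorem pvInv_decomp (cs : List (List (List Int))) (col : List (List Int))
    (hlast : cs.getLast? = some col) : cs.dropLast ++ [col] = cs := by
  have hcsne : cs ≠ [] := by intro he; rw [he] at hlast; simp at hlast
  have h := List.dropLast_concat_getLast hcsne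
  rw [List.getLast?_eq_getLast hcsne] at hlast
  injection hlast with h2
  rwa [h2] at h

theorem pvInv_chain (tol : Int) (r : List Int) (cs : List (List (List Int)))
    (hch : List.IsChain (fun a b => a + tol ≤ b) (cs.map pvAnchor))
    (hne : ∀ c ∈ cs, c ≠ [])
    (hle1 : ∀ c ∈ cs, pvAnchor c ≤ r.head?.getD 0) :
    List.IsChain (fun a b => a + tol ≤ b) ((pvStepB tol cs r).map pvAnchor) := by
  cases hlast : cs.getLast? with
  | none =>
    have hnil : cs = [] := by simpa using hlast
    subst hnil
    simpa [pvStepB] using List.isChain_singleton (pvAnchor [r])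
  | some col =>
    have hcs := pvInv_decomp cs col hlast
    have hcolmem : col ∈ cs := by rw [← hcs]; simp
    have hcolne : col ≠ [] := hne col hcolmem
    simp only [pvStepB, hlast]
    split
    next hm =>
      have hmap : (cs.dropLast ++ [col ++ [r]]).map pvAnchor = cs.map pvAnchor := by
        conv_rhs => rw [← hcs]
        simp [pvAnchor_append col hcolne r]
      rw [hmap]; exact hch
    next hm =>
      rw [List.map_append, List.isChain_append]
      refine ⟨hch, by simpa using List.isChain_singleton (pvAnchor [r]), ?_⟩
      intro a ha b hb
      rw [List.getLast?_map, hlast] at ha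
      simp at ha hb
      subst ha; subst hb
      have hcc := hle1 col hcolmem
      rw [abs_sub_lt_iff] at hm
      simp only [pvAnchor, List.head?_cons, Option.getD_some] at hcc hm ⊢
      omega

theorem pvInv_ne (tol : Int) (r : List Int) (cs : List (List (List Int)))
    (hne : ∀ c ∈ cs, c ≠ []) :
    ∀ c ∈ pvStepB tol cs r, c ≠ [] := by
  intro c hc
  cases hlast : cs.getLast? with
  | none =>
    have hnil : cs = [] := by simpa using hlast
    subst hnil
    simp [pvStepB] at hc; subst hc; simp
  | some col =>
    have hcs := pvInv_decomp cs col hlast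
    have hcolmem : col ∈ cs := by rw [← hcs]; simp
    have hcolne : col ≠ [] := hne col hcolmem
    simp only [pvStepB, hlast] at hc
    split at hc
    · rcases List.mem_append.mp hc with h | h
      · exact hne c (List.dropLast_subset _ h)
      · simp at h; subst h; simp [hcolne]
    · rcases List.mem_append.mp hc with h | h
      · exact hne c h
      · simp at h; subst h; simp

theorem pvInv_le (tol : Int) (r : List Int) (rest : List (List Int))
    (cs : List (List (List Int)))
    (hne : ∀ c ∈ cs, c ≠ [])
    (hle : ∀ c ∈ cs, ∀ x ∈ r :: rest, pvAnchor c ≤ x.head?.getD 0)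
    (hsr : ∀ x ∈ rest, r.head?.getD 0 ≤ x.head?.getD 0) :
    ∀ c ∈ pvStepB tol cs r, ∀ x ∈ rest, pvAnchor c ≤ x.head?.getD 0 := by
  intro c hc x hx
  cases hlast : cs.getLast? with
  | none =>
    have hnil : cs = [] := by simpa using hlast
    subst hnil
    simp [pvStepB] at hc; subst hc
    simpa [pvAnchor] using hsr x hx
  | some col =>
    have hcs := pvInv_decomp cs col hlast
    have hcolmem : col ∈ cs := by rw [← hcs]; simp
    have hcolne : col ≠ [] := hne col hcolmem
    simp only [pvStepB, hlast] at hc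
    split at hc
    · rcases List.mem_append.mp hc with h | h
      · exact hle c (List.dropLast_subset _ h) x (List.mem_cons_of_mem _ hx)
      · simp at h; subst h
        rw [pvAnchor_append col hcolne r]
        exact hle col hcolmem x (List.mem_cons_of_mem _ hx)
    · rcases List.mem_append.mp hc with h | h
      · exact hle c h x (List.mem_cons_of_mem _ hx)
      · simp at h; subst h
        simpa [pvAnchor] using hsr x hx

-- folding A's loop = folding B's loop, given the invariant
theorem pvFold_eq (tol : Int) :
    ∀ (l : List (List Int)) (cs : List (List (List Int))),
      (l.Pairwise (fun a b => a.head?.getD 0 ≤ b.head?.getD 0)) →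
      (List.IsChain (fun a b => a + tol ≤ b) (cs.map pvAnchor)) →
      (∀ c ∈ cs, c ≠ []) →
      (∀ c ∈ cs, ∀ r ∈ l, pvAnchor c ≤ r.head?.getD 0) →
      l.foldl (fun columns r =>
          match pvPlaceA tol r columns with
          | some cs' => cs'
          | none => columns ++ [[r]]) cs
        = l.foldl (pvStepB tol) cs
  | [], cs, _, _, _, _ => rfl
  | r :: rest, cs, hsort, hch, hne, hle => by
    have hsr : ∀ x ∈ rest, r.head?.getD 0 ≤ x.head?.getD 0 := (List.pairwise_cons.mp hsort).1
    have hle1 : ∀ c ∈ cs, pvAnchor c ≤ r.head?.getD 0 := fun c hc => hle c hc r (by simp)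
    simp only [List.foldl_cons, pvStep_eq tol r cs hch hle1]
    exact pvFold_eq tol rest (pvStepB tol cs r) (List.pairwise_cons.mp hsort).2
      (pvInv_chain tol r cs hch hne hle1) (pvInv_ne tol r cs hne)
      (pvInv_le tol r rest cs hne hle hsr)

-- ===== VERDICT (by name: the statement is the Claim_ definition above) =====
theorem group_columns_spec : Claim_equal_group_columns := by
  intro rects tol _ _
  unfold Spec_group_columns group_columns group_columns_alt
  exact pvFold_eq tol _ [] (PySem.List.sorted_pairwise rects _) (by exact List.isChain_nil) (by simp) (by simp)
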